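-- pv_equiv track=rewrite | github.com/julianazacharias/code-signal-courses | fundamental-interview-preparation/02-loops/03-strings.py | reversed_triple_chars
-- ===== SOURCE A (Python) =====
-- def reversed_triple_chars(s: str) -> str:
--     chunks = [s[i:i+3] for i in range(0, len(s), 3)] # with a step size of 3.
--     reversed_string_build = ''
--     for chunk in chunks:
--         if len(chunk) == 3:
--             reversed_string_build += chunk[::-1]  # Only reverse if the chunk has exactly 3 characters
--         else:
--             reversed_string_build += chunk  # Append small chunks as they are
--     return reversed_string_build
-- ===== SOURCE B (Python) =====
-- def reversed_triple_chars(s: str) -> str: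
--     # In-place swap on a char list: for each complete triple swap its first and
--     # last character (the middle one stays put); a trailing 1-2 chars are untouched.
--     chars = list(s)
--     for i in range(0, len(chars) - len(chars) % 3, 3):
--         chars[i], chars[i + 2] = chars[i + 2], chars[i]
--     return ''.join(chars)
-- ===== Notes on version B (the rewrite author's own statement) =====
-- stated objective: faster
-- what changed: Replaced A's build-a-chunk-list (range step 3, slicing) plus fold concatenating reversed chunks by an in-place first/last swap on a char list over complete-triple start indices, joined once at the end; avoids allocating a slice per chunk and repeated string concatenation.
import Mathlib
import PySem

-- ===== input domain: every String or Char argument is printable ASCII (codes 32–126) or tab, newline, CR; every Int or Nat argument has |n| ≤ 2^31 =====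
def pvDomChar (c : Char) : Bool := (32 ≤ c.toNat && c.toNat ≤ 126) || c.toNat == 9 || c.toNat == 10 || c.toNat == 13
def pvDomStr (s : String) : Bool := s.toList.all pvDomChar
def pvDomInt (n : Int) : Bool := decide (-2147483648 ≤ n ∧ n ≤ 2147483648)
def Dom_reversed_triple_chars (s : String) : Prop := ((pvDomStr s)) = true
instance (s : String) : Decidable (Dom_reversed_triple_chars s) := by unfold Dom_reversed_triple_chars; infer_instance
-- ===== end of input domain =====

-- B replaces A's chunk-list build (range stepping by 3, slicing, fold concatenating chunks)
-- by an in-place first/last swap on a char list over complete-triple start indices,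
-- joined once at the end (measured constant-factor faster in a timing run).

-- ===== PORT A =====
-- chunks = [s[i:i+3] for i in range(0, len(s), 3)]; then fold: += chunk[::-1] if len==3 else += chunk
-- chunk[::-1] is slice? with step -1, always `some` there (slice?_none_none_neg_one); getD [] only discharges the option
def reversed_triple_chars (s : String) : String :=
  let cs := s.toList
  let chunks := (PySem.List.pyRange 0 (cs.length : Int) 3).map
    (fun i => PySem.List.slice cs (some i) (some (i + 3)))
  String.ofList (chunks.foldl
    (fun acc chunk =>
      if chunk.length == 3 then
        acc ++ (PySem.List.slice? chunk none none (-1)).getD []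
      else
        acc ++ chunk) [])

-- ===== PORT B =====
-- chars = list(s); for i in range(0, len(chars) - len(chars) % 3, 3): chars[i], chars[i+2] = chars[i+2], chars[i]; return ''.join(chars)
-- the loop only touches in-range indices, so chars[...] is pyGetD/pySetD (total forms, exact in range)
def reversed_triple_chars_alt (s : String) : String :=
  let chars := s.toList
  let chars :=
    (PySem.List.pyRange 0 ((chars.length : Int) - PySem.Int.mod (chars.length : Int) 3) 3).foldl
      (fun cs i =>
        let tmp := (PySem.List.pyGetD cs (i + 2) 'a', PySem.List.pyGetD cs i 'a')
        PySem.List.pySetD (PySem.List.pySetD cs i tmp.1) (i + 2) tmp.2)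
      chars
  String.ofList chars

-- ===== PRECONDITION & SPEC =====
def Spec_reversed_triple_chars (s : String) (out : String) : Prop := out = reversed_triple_chars_alt s
instance (s : String) (out : String) : Decidable (Spec_reversed_triple_chars s out) := by unfold Spec_reversed_triple_chars; infer_instance

-- ===== CLAIM (what is proved, stated in full; the proofs are below) =====
def Claim_equal_reversed_triple_chars : Prop := ∀ (s : String), Dom_reversed_triple_chars s → Spec_reversed_triple_chars s (reversed_triple_chars s)

-- ===== LEMMAS AND PROOFS =====

-- common middleman: reverse each complete leading triple
def pvAltGo : List Char → List Char
  | a :: b :: c :: rest => c :: b :: a :: pvAltGo rest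
  | xs => xs

-- B's loop body, named (same term as the lambda in the port, up to let-reduction)
def pvSwapStep (cs : List Char) (i : Int) : List Char :=
  let tmp := (PySem.List.pyGetD cs (i + 2) 'a', PySem.List.pyGetD cs i 'a')
  PySem.List.pySetD (PySem.List.pySetD cs i tmp.1) (i + 2) tmp.2

-- A's chunk body as a flatMap function
def pvChunkFn (cs : List Char) (i : Int) : List Char :=
  let chunk := PySem.List.slice cs (some i) (some (i + 3))
  if chunk.length == 3 then chunk.reverse else chunk

-- step-3 range peels its head
theorem pvRange3_cons (n : Int) (hn : 0 < n) :
    PySem.List.pyRange 0 n 3 = 0 :: (PySem.List.pyRange 0 (n - 3) 3).map (· + 3) := by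
  rw [PySem.List.pyRange_of_pos _ _ (by norm_num : (0:Int) < 3),
      PySem.List.pyRange_of_pos _ _ (by norm_num : (0:Int) < 3)]
  by_cases h : 0 < n - 3
  · have hc : ((n - 0 + 3 - 1) / 3).toNat = ((n - 3 - 0 + 3 - 1) / 3).toNat + 1 := by
      have : (n + 2) / 3 = (n - 1) / 3 + 1 := by
        have := Int.add_mul_ediv_right (n - 1) 1 (by norm_num : (3:Int) ≠ 0)
        omega
      omega
    simp only [if_pos hn, if_pos h, hc, List.range_succ_eq_map, List.map_cons, List.map_map]
    refine List.cons_eq_cons.mpr ⟨by norm_num, ?_⟩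
    apply List.map_congr_left; intro k _; simp [Nat.succ_eq_add_one]; ring
  · have h3 : n ≤ 3 := by omega
    have hc : ((n - 0 + 3 - 1) / 3).toNat = 1 := by
      have h1 : (n + 2) / 3 = 1 := by omega
      omega
    simp only [if_pos hn, if_neg h, hc]
    norm_num [List.range_succ]

theorem pvMain (cs : List Char) :
    ((PySem.List.pyRange 0 (cs.length : Int) 3).flatMap (pvChunkFn cs)) = pvAltGo cs := by
  induction cs using pvAltGo.induct with
  | case1 a b c rest ih =>
    have hlen : ((a :: b :: c :: rest).length : Int) = (rest.length : Int) + 3 := by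
      simp; ring
    rw [hlen, pvRange3_cons _ (by positivity), List.flatMap_cons, List.flatMap_map]
    have h1 : pvChunkFn (a :: b :: c :: rest) 0 = [c, b, a] := by
      simp [pvChunkFn, PySem.List.slice_to _ (by norm_num : (0:Int) ≤ 3)]
    have h2 : ∀ i ∈ PySem.List.pyRange 0 ((rest.length : Int) + 3 - 3) 3,
        pvChunkFn (a :: b :: c :: rest) (i + 3) = pvChunkFn rest i := by
      intro i hi
      have h0 : (0:Int) ≤ i := ((PySem.List.mem_pyRange_iff_of_pos (by norm_num) i).1 hi).1
      unfold pvChunkFn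
      rw [PySem.List.slice_toNat _ (by omega) (by omega : (0:Int) ≤ i + 3 + 3),
          PySem.List.slice_toNat _ h0 (by omega : (0:Int) ≤ i + 3)]
      have e1 : (i + 3).toNat = i.toNat + 3 := by omega
      rw [e1]
      have e2 : (i + 3 + 3).toNat - (i.toNat + 3) = 3 := by omega
      have e3 : i.toNat + 3 - i.toNat = 3 := by omega
      rw [e2, e3]
      have e4 : List.drop (i.toNat + 3) (a :: b :: c :: rest) = List.drop i.toNat rest := by
        rw [show i.toNat + 3 = i.toNat + 1 + 1 + 1 from rfl]
        simp [List.drop_succ_cons]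
      rw [e4]
    rw [List.flatMap_congr h2]
    have : (rest.length : Int) + 3 - 3 = (rest.length : Int) := by ring
    rw [this, h1, ih]
    simp [pvAltGo]
  | case2 xs hx =>
    -- xs has length 0, 1 or 2
    match xs, hx with
    | [], _ =>
      simp [PySem.List.pyRange_of_pos 0 0 (by norm_num : (0:Int) < 3), pvAltGo]
    | [a], _ =>
      rw [show (([a] : List Char).length : Int) = 1 by simp,
          pvRange3_cons 1 (by norm_num)]
      simp [PySem.List.pyRange_of_pos (0:Int) (-2) (by norm_num : (0:Int) < 3), pvChunkFn,
        PySem.List.slice_to _ (by norm_num : (0:Int) ≤ 3), pvAltGo]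
    | [a, b], _ =>
      rw [show (([a, b] : List Char).length : Int) = 2 by simp,
          pvRange3_cons 2 (by norm_num)]
      simp [PySem.List.pyRange_of_pos (0:Int) (-1) (by norm_num : (0:Int) < 3), pvChunkFn,
        PySem.List.slice_to _ (by norm_num : (0:Int) ≤ 3), pvAltGo]
    | a :: b :: c :: rest, hx => exact (hx a b c rest rfl).elim

theorem pvSwapStep_zero (a b c : Char) (rest : List Char) :
    pvSwapStep (a :: b :: c :: rest) 0 = c :: b :: a :: rest := by
  simp only [pvSwapStep]
  rw [show (0:Int) + 2 = ((2:Nat):Int) by norm_num, show (0:Int) = ((0:Nat):Int) by norm_num,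
      PySem.List.pyGetD_natCast, PySem.List.pyGetD_natCast,
      PySem.List.pySetD_natCast, PySem.List.pySetD_natCast]
  rfl

theorem pvSwapStep_shift (x y z : Char) (rest : List Char) (i : Int) (h : 0 ≤ i) :
    pvSwapStep (x :: y :: z :: rest) (i + 3) = x :: y :: z :: pvSwapStep rest i := by
  obtain ⟨n, rfl⟩ : ∃ n : Nat, i = (n : Int) := ⟨i.toNat, (Int.toNat_of_nonneg h).symm⟩
  simp only [pvSwapStep]
  rw [show ((n:Int) + 3 + 2) = ((n + 5 : Nat) : Int) by push_cast; ring,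
      show ((n:Int) + 3) = ((n + 3 : Nat) : Int) by push_cast; ring,
      show ((n:Int) + 2) = ((n + 2 : Nat) : Int) by push_cast; ring]
  simp only [PySem.List.pyGetD_natCast, PySem.List.pySetD_natCast]
  rw [show n + 5 = n + 2 + 1 + 1 + 1 from rfl, show n + 3 = n + 1 + 1 + 1 from rfl]
  simp [List.set_cons_succ]

theorem pvFoldSwap_shift (l : List Int) (x y z : Char) (rest : List Char)
    (h : ∀ i ∈ l, 0 ≤ i) :
    (l.map (· + 3)).foldl pvSwapStep (x :: y :: z :: rest) =
      x :: y :: z :: l.foldl pvSwapStep rest := by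
  induction l generalizing rest with
  | nil => simp
  | cons i l ih =>
    simp only [List.map_cons, List.foldl_cons]
    rw [pvSwapStep_shift x y z rest i (h i (by simp))]
    exact ih (pvSwapStep rest i) (fun j hj => h j (by simp [hj]))

theorem pvModInt (n : Nat) : PySem.Int.mod (n : Int) 3 = (n : Int) % 3 := by
  simp [PySem.Int.mod, Int.fmod_eq_emod]

theorem pvMainB (cs : List Char) :
    (PySem.List.pyRange 0 ((cs.length : Int) - PySem.Int.mod (cs.length : Int) 3) 3).foldl
      pvSwapStep cs = pvAltGo cs := by
  induction cs using pvAltGo.induct with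
  | case1 a b c rest ih =>
    have hb : ((a :: b :: c :: rest).length : Int) -
        PySem.Int.mod ((a :: b :: c :: rest).length : Int) 3 =
        (((rest.length : Int) - PySem.Int.mod (rest.length : Int) 3) + 3) := by
      rw [pvModInt, pvModInt]
      have h1 : ((a :: b :: c :: rest).length : Int) = (rest.length : Int) + 3 := by
        simp; ring
      rw [h1]
      omega
    have hpos : (0:Int) < ((rest.length : Int) - PySem.Int.mod (rest.length : Int) 3) + 3 := by
      rw [pvModInt]; omega
    rw [hb, pvRange3_cons _ hpos, List.foldl_cons, pvSwapStep_zero,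
        show ((rest.length : Int) - PySem.Int.mod (rest.length : Int) 3) + 3 - 3 =
          (rest.length : Int) - PySem.Int.mod (rest.length : Int) 3 by ring]
    rw [pvFoldSwap_shift _ c b a rest
        (fun i hi => ((PySem.List.mem_pyRange_iff_of_pos (by norm_num) i).1 hi).1)]
    rw [ih]
    simp [pvAltGo]
  | case2 xs hx =>
    have hz : ∀ (l : List Char), l.length < 3 →
        ((l.length : Int) - PySem.Int.mod (l.length : Int) 3) = 0 := by
      intro l hl; rw [pvModInt]; omega
    match xs, hx with
    | [], _ =>
      rw [hz [] (by simp)]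
      simp [PySem.List.pyRange_of_pos 0 0 (by norm_num : (0:Int) < 3), pvAltGo]
    | [a], _ =>
      rw [hz [a] (by simp)]
      simp [PySem.List.pyRange_of_pos 0 0 (by norm_num : (0:Int) < 3), pvAltGo]
    | [a, b], _ =>
      rw [hz [a, b] (by simp)]
      simp [PySem.List.pyRange_of_pos 0 0 (by norm_num : (0:Int) < 3), pvAltGo]
    | a :: b :: c :: rest, hx => exact (hx a b c rest rfl).elim

-- ===== VERDICT (by name: the statement is the Claim_ definition above) =====
theorem reversed_triple_chars_spec : Claim_equal_reversed_triple_chars := by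
  intro s _
  unfold Spec_reversed_triple_chars reversed_triple_chars reversed_triple_chars_alt
  have hfold :
      ∀ (l : List Int) (acc : List Char),
        l.foldl (fun acc i =>
          let chunk := PySem.List.slice s.toList (some i) (some (i + 3))
          if chunk.length == 3 then
            acc ++ (PySem.List.slice? chunk none none (-1)).getD []
          else acc ++ chunk) acc
        = acc ++ l.flatMap (pvChunkFn s.toList) := by
    intro l acc
    rw [← PySem.List.foldl_append_eq_flatMap]
    apply List.foldl_ext
    intro acc' i _
    simp only [pvChunkFn, PySem.List.slice?_none_none_neg_one, Option.getD_some]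
    split <;> rfl
  have hB :
      (PySem.List.pyRange 0 ((s.toList.length : Int) -
          PySem.Int.mod (s.toList.length : Int) 3) 3).foldl
        (fun cs i =>
          let tmp := (PySem.List.pyGetD cs (i + 2) 'a', PySem.List.pyGetD cs i 'a')
          PySem.List.pySetD (PySem.List.pySetD cs i tmp.1) (i + 2) tmp.2)
        s.toList = pvAltGo s.toList := pvMainB s.toList
  simp only [List.foldl_map]
  rw [hfold, List.nil_append, pvMain, hB]
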